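-- pv_equiv track=rewrite | github.com/ShobhitDubey0729/DSA-diaries | Indian_national_flag.py | countingColors
-- ===== SOURCE A (Python) =====
-- def countingColors(A):
--     count1 = 0
--     count2 = 0
--     count3 = 0
--     for i in range(len(A)):
--         if A[i] == 0:
--             count1 += 1
--         elif A[i] == 1:
--             count2 += 1
--         else:
--             count3 += 1
--     out = [] # O(n) space
--     out.append(0*count1)
--     out.append(1*count2)
--     out.append(2*count3)
--     return out
-- ===== SOURCE B (Python) =====
-- def countingColors(A):
--     c1 = sum(1 for x in A if x == 1)
--     crest = len(A) - A.count(0) - c1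
--     return [0, c1, 2 * crest]
-- ===== Notes on version B (the rewrite author's own statement) =====
-- stated objective: simpler
-- what changed: Replaces the three-way branching accumulator loop with independent counting passes (a filter-count for 1s and a subtraction via len and count(0) for the rest) and drops the zero count since out[0] is always 0.
import Mathlib
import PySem

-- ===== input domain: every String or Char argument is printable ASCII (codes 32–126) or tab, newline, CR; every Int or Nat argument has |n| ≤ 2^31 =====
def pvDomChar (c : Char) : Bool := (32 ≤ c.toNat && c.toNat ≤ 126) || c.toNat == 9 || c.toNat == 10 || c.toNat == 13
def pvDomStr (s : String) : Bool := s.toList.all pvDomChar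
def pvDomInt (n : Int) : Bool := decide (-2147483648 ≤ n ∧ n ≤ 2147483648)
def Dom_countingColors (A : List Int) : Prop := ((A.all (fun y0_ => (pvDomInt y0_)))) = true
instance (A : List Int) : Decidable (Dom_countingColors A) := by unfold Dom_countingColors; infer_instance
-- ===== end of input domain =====

-- ===== PORT A =====
-- B counts 1s with a filter-count and derives the rest from len and count(0); A's single three-way branch loop is ported literally below.
def countingColors (A : List Int) : List Int :=
  let s := (PySem.List.pyRange 0 (PySem.List.len A) 1).foldl
    (fun (s : Int × Int × Int) i =>
      let x := PySem.List.pyGetD A i 0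
      if x == 0 then (s.1 + 1, s.2.1, s.2.2)
      else if x == 1 then (s.1, s.2.1 + 1, s.2.2)
      else (s.1, s.2.1, s.2.2 + 1)) (0, 0, 0)
  [0 * s.1, 1 * s.2.1, 2 * s.2.2]

-- ===== PORT B =====
def countingColors_alt (A : List Int) : List Int :=
  let c1 : Int := A.foldl (fun acc x => if x == 1 then acc + 1 else acc) 0
  let crest : Int := (A.length : Int) - (PySem.List.count A 0 : Int) - c1
  [0, c1, 2 * crest]

-- ===== PRECONDITION & SPEC =====
def Spec_countingColors (A : List Int) (out : List Int) : Prop := out = countingColors_alt A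
instance (A : List Int) (out : List Int) : Decidable (Spec_countingColors A out) := by unfold Spec_countingColors; infer_instance

-- ===== CLAIM =====
def Claim_equal_countingColors : Prop := ∀ (A : List Int), Dom_countingColors A → Spec_countingColors A (countingColors A)

-- ===== LEMMAS AND PROOFS =====
theorem loop_classify (A : List Int) (c1 c2 c3 : Int) :
    A.foldl (fun (s : Int × Int × Int) x =>
      if x == 0 then (s.1 + 1, s.2.1, s.2.2)
      else if x == 1 then (s.1, s.2.1 + 1, s.2.2)
      else (s.1, s.2.1, s.2.2 + 1)) (c1, c2, c3)
    = (c1 + (A.count 0 : Int), c2 + (A.count 1 : Int),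
       c3 + ((A.length : Int) - (A.count 0 : Int) - (A.count 1 : Int))) := by
  induction A generalizing c1 c2 c3 with
  | nil => simp
  | cons a t ih =>
    rw [List.foldl_cons]
    by_cases h0 : a = 0
    · subst h0
      rw [if_pos (show (((0:Int)) == 0) = true from rfl)]
      dsimp only
      rw [ih]
      simp
      omega
    · by_cases h1 : a = 1
      · subst h1
        rw [if_neg (show ¬ (((1:Int)) == 0) = true from by decide),
            if_pos (show (((1:Int)) == 1) = true from rfl)]
        dsimp only
        rw [ih]
        simp
        omega
      · rw [if_neg (show ¬ ((a == 0) = true) from by simpa using h0),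
            if_neg (show ¬ ((a == 1) = true) from by simpa using h1)]
        dsimp only
        rw [ih]
        simp only [Prod.mk.injEq, List.count_cons, List.length_cons, h0, h1,
          if_false, beq_iff_eq]
        push_cast
        omega

-- ===== VERDICT =====
theorem countingColors_spec : Claim_equal_countingColors := by
  intro A _
  show countingColors A = countingColors_alt A
  unfold countingColors countingColors_alt
  simp only []
  rw [show PySem.List.len A = ((A.length : Int)) from rfl,
      PySem.List.foldl_pyRange_zero_pyGetD' A 0
        (fun (s : Int × Int × Int) x =>
          if x == 0 then (s.1 + 1, s.2.1, s.2.2)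
          else if x == 1 then (s.1, s.2.1 + 1, s.2.2)
          else (s.1, s.2.1, s.2.2 + 1)) ((0:Int),(0:Int),(0:Int))]
  rw [loop_classify, PySem.List.foldl_beq_add_one]
  simp [PySem.List.count]
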